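-- pv_equiv track=rewrite | github.com/stas6626/mailru-2_task | solution.py | solution
-- ===== SOURCE A (Python) =====
-- def fib(n):#функция чтобы не заморачиваться с подсчетом чисел
--     a = 0
--     b = 1
--     for __ in range(n):
--         a, b = b, a + b
--     return a
--
-- def solution(A):
--     summa=0
--     itog=0
--     for i in range(1,A+1):#ищем максимум
--         if fib(i)%2==0:
--             summa+=fib(i)
--
--     while(summa>0):#считаем сумму чисел максимума
--         itog+=summa%10
--         summa=summa//10
--     return itog #не работает, доработай!
-- ===== SOURCE B (Python) =====
-- def solution(A):
--     # single incremental Fibonacci pass accumulating even terms, then recursive digit sum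
--     summa = 0
--     a, b = 0, 1
--     for _ in range(A):
--         a, b = b, a + b
--         if a % 2 == 0:
--             summa += a
--
--     def digit_sum(n):
--         return 0 if n <= 0 else n % 10 + digit_sum(n // 10)
--
--     return digit_sum(summa)
-- ===== Notes on version B (the rewrite author's own statement) =====
-- stated objective: faster
-- what changed: B computes Fibonacci numbers incrementally in one pass (accumulating the even ones) instead of recomputing fib(i) from scratch for every i, and replaces the while-loop digit sum by a recursive digit sum.
import Mathlib
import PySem

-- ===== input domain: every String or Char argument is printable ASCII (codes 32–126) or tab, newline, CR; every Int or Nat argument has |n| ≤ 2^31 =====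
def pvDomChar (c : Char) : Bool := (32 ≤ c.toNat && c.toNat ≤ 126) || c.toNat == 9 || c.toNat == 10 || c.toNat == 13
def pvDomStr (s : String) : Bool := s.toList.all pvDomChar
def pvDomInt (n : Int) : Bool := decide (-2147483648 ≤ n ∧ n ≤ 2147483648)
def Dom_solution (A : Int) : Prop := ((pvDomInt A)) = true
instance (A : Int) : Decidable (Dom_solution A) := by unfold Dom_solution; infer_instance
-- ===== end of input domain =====

-- B replaces A's per-index recomputation of fib (O(A^2) additions) by one incremental
-- Fibonacci pass, and A's while-loop digit sum by a recursive digit sum: asymptotically faster.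

-- ===== PORT A =====
-- helper fib: a, b = 0, 1; for _ in range(n): a, b = b, a + b; return a
def fibA (n : Int) : Int :=
  ((PySem.List.pyRange 0 n 1).foldl (fun (p : Int × Int) _ => (p.2, p.1 + p.2)) (0, 1)).1

-- while summa > 0: itog += summa % 10; summa //= 10
def digitLoopA (itog summa : Int) : Int :=
  if 0 < summa then
    digitLoopA (itog + PySem.Int.mod summa 10) (PySem.Int.floordiv summa 10)
  else itog
termination_by summa.toNat
decreasing_by
  have h10 : PySem.Int.floordiv summa 10 = summa / 10 :=
    PySem.Int.floordiv_eq_ediv_of_pos (by omega)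
  rw [h10]; omega

def solution (A : Int) : Int :=
  let summa := (PySem.List.pyRange 1 (A + 1) 1).foldl
    (fun s i => if PySem.Int.mod (fibA i) 2 = 0 then s + fibA i else s) 0
  digitLoopA 0 summa

-- ===== PORT B =====
-- def digit_sum(n): return 0 if n <= 0 else n % 10 + digit_sum(n // 10)
def digitSumB (n : Int) : Int :=
  if n ≤ 0 then 0
  else PySem.Int.mod n 10 + digitSumB (PySem.Int.floordiv n 10)
termination_by n.toNat
decreasing_by
  have h10 : PySem.Int.floordiv n 10 = n / 10 :=
    PySem.Int.floordiv_eq_ediv_of_pos (by omega)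
  rw [h10]; omega

-- state (summa, a, b); for _ in range(A): a, b = b, a + b; if a % 2 == 0: summa += a
def solution_alt (A : Int) : Int :=
  let st := (PySem.List.pyRange 0 A 1).foldl
    (fun (st : Int × Int × Int) _ =>
      let a' := st.2.2
      let b' := st.2.1 + st.2.2
      ((if PySem.Int.mod a' 2 = 0 then st.1 + a' else st.1), a', b'))
    (0, 0, 1)
  digitSumB st.1

-- ===== PRECONDITION & SPEC =====
def Spec_solution (A : Int) (out : Int) : Prop := out = solution_alt A
instance (A : Int) (out : Int) : Decidable (Spec_solution A out) := by unfold Spec_solution; infer_instance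

-- ===== CLAIM (what is proved, stated in full; the proofs are below) =====
def Claim_equal_solution : Prop := ∀ (A : Int), Dom_solution A → Spec_solution A (solution A)

-- ===== LEMMAS AND PROOFS =====

-- the (a, b) pair A's fib helper computes, as a function of the loop bound
def fibPair (n : Int) : Int × Int :=
  (PySem.List.pyRange 0 n 1).foldl (fun (p : Int × Int) _ => (p.2, p.1 + p.2)) (0, 1)

theorem fibPair_succ (n : Nat) :
    fibPair ((n : Int) + 1) = ((fibPair n).2, (fibPair n).1 + (fibPair n).2) := by
  unfold fibPair
  rw [PySem.List.pyRange_one_succ_right (by exact_mod_cast Int.natCast_nonneg n)]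
  simp [List.foldl_append]

theorem digitLoopA_eq (k : Nat) :
    ∀ (s : Int), s.toNat ≤ k → ∀ itog, digitLoopA itog s = itog + digitSumB s := by
  induction k with
  | zero =>
    intro s hs itog
    have hle : s ≤ 0 := by omega
    rw [digitLoopA, digitSumB]
    simp [hle, not_lt.mpr hle]
  | succ k ih =>
    intro s hs itog
    by_cases hpos : 0 < s
    · rw [digitLoopA, digitSumB]
      simp only [hpos, if_pos, not_le.mpr hpos, if_false]
      have h10 : PySem.Int.floordiv s 10 = s / 10 :=
        PySem.Int.floordiv_eq_ediv_of_pos (by omega)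
      have hrec : (PySem.Int.floordiv s 10).toNat ≤ k := by rw [h10]; omega
      rw [ih _ hrec]
      ring
    · rw [digitLoopA, digitSumB]
      simp [hpos, show s ≤ 0 by omega]

-- the incremental loop of B computes A's even-fib sum together with the fib pair
theorem loop_eq (m : Nat) :
    (PySem.List.pyRange 0 (m : Int) 1).foldl
      (fun (st : Int × Int × Int) _ =>
        let a' := st.2.2
        let b' := st.2.1 + st.2.2
        ((if PySem.Int.mod a' 2 = 0 then st.1 + a' else st.1), a', b'))
      (0, 0, 1)
    = ((PySem.List.pyRange 1 ((m : Int) + 1) 1).foldl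
        (fun s i => if PySem.Int.mod (fibA i) 2 = 0 then s + fibA i else s) 0,
       fibPair m) := by
  induction m with
  | zero =>
    simp [PySem.List.pyRange_one_eq_nil, fibPair]
  | succ m ih =>
    have hcast : ((m + 1 : Nat) : Int) = (m : Int) + 1 := by push_cast; ring
    rw [hcast]
    rw [PySem.List.pyRange_one_succ_right (a := 0) (b := (m : Int))
          (by exact_mod_cast Int.natCast_nonneg m)]
    rw [PySem.List.pyRange_one_succ_right (a := 1) (b := (m : Int) + 1) (by omega)]
    rw [List.foldl_append, List.foldl_append, ih]
    have hfib : fibA ((m : Int) + 1) = (fibPair ((m : Int) + 1)).1 := rfl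
    simp only [List.foldl_cons, List.foldl_nil, hfib, fibPair_succ m]

-- ===== VERDICT (by name: the statement is the Claim_ definition above) =====
theorem solution_spec : Claim_equal_solution := by
  intro A _
  unfold Spec_solution solution solution_alt
  by_cases hA : A ≤ 0
  · rw [PySem.List.pyRange_one_eq_nil (by omega : (A : Int) + 1 ≤ 1),
        PySem.List.pyRange_one_eq_nil (by omega : A ≤ 0)]
    simp only [List.foldl_nil]
    rw [digitLoopA_eq 0 0 (by omega) 0]
    ring
  · have hm : A = ((A.toNat : Nat) : Int) := by omega
    rw [hm, loop_eq A.toNat]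
    set s := (PySem.List.pyRange 1 ((A.toNat : Int) + 1) 1).foldl
        (fun s i => if PySem.Int.mod (fibA i) 2 = 0 then s + fibA i else s) 0 with hs
    rw [digitLoopA_eq s.toNat s (le_refl _) 0]
    ring
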